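-- pv_equiv track=rewrite | github.com/kashima1234/labs_py | aaaall labs/Python/semestar 1/ЛБ10.py | brk
-- ===== SOURCE A (Python) =====
-- def brk(listed):
--     seperator = [' ', ',', '.', '"', "'", ';', ':', '[', ']', '{', '}', '=', '+', '-', '_', ')', '(', '1', '!', '/', '\\', '?', '>', '<']
--     breakedLines = []
--     i = -1
--     for line in listed:
--         breakedLines.append([''])
--         i += 1
--         j = 0
--         for char in line:
--             if char in seperator:
--                 breakedLines[i].append(char)
--                 breakedLines[i].append("")
--                 j += 2
--             else:
--                 breakedLines[i][j] += char
--
--     return breakedLines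
-- ===== SOURCE B (Python) =====
-- import re
--
-- _SEPS = ' ,."\';:[]{}=+-_)(1!/\\?><'
-- _PAT = re.compile('([' + re.escape(_SEPS) + '])')
--
-- def brk(listed):
--     return [_PAT.split(line) for line in listed]
-- ===== Notes on version B (the rewrite author's own statement) =====
-- stated objective: idiomatic
-- what changed: Replaced the per-character state machine that mutates the last element of a growing list with a single precompiled regex (a capturing character class of the escaped separators) and re.split per line, which yields the same alternating [text, sep, text, ...] structure.
import Mathlib
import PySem

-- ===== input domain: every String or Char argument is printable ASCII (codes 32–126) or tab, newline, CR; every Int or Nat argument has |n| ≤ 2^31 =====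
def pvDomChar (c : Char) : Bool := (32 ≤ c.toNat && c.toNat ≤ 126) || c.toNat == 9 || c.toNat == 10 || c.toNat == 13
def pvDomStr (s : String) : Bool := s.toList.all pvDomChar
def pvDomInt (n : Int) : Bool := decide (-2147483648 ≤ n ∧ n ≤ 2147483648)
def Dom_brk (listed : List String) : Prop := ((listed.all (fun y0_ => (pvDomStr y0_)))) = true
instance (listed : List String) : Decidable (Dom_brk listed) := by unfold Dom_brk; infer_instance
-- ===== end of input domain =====

-- B replaces A's per-character state machine (append/grow last element, index j) by one
-- split-keeping-separators pass per line (re.split with a capturing class); same return value.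

-- ===== PORT A =====
-- the separator list of A
def brkSeps : List Char :=
  [' ', ',', '.', '"', '\'', ';', ':', '[', ']', '{', '}', '=', '+', '-', '_', ')', '(', '1', '!', '/', '\\', '?', '>', '<']

-- inner loop of A: state = (current line's token list, index j of the token being extended)
def brkStep (st : List (List Char) × Nat) (c : Char) : List (List Char) × Nat :=
  if c ∈ brkSeps then (st.1 ++ [[c], []], st.2 + 2)
  else (st.1.modify st.2 (fun t => t ++ [c]), st.2)

def brk (listed : List String) : List (List String) :=
  listed.foldl (fun breakedLines line =>
    breakedLines ++ [((line.toList.foldl brkStep ([[]], 0)).1.map (fun t => String.mk t))]) []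

-- ===== PORT B =====
-- port of re.split('([seps])', line): split keeping each separator as its own element
def brkSplit : List Char → List (List Char)
  | [] => [[]]
  | c :: rest =>
    if c ∈ brkSeps then [] :: [c] :: brkSplit rest
    else match brkSplit rest with
      | [] => [[c]]  -- unreachable: brkSplit never returns []
      | t :: ts => (c :: t) :: ts

def brk_alt (listed : List String) : List (List String) :=
  listed.map (fun line => (brkSplit line.toList).map (fun t => String.mk t))

-- ===== PRECONDITION & SPEC =====
def Spec_brk (listed : List String) (out : List (List String)) : Prop := out = brk_alt listed
instance (listed : List String) (out : List (List String)) : Decidable (Spec_brk listed out) := by unfold Spec_brk; infer_instance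

-- ===== CLAIM (what is proved, stated in full; the proofs are below) =====
def Claim_equal_brk : Prop := ∀ (listed : List String), Dom_brk listed → Spec_brk listed (brk listed)

-- ===== LEMMAS AND PROOFS =====

theorem brkSplit_ne_nil (cs : List Char) : brkSplit cs ≠ [] := by
  cases cs with
  | nil => simp [brkSplit]
  | cons c rest =>
    simp only [brkSplit]
    split
    · simp
    · cases h : brkSplit rest <;> simp

theorem modify_append_last {α : Type} (l : List α) (a : α) (f : α → α) :
    (l ++ [a]).modify l.length f = l ++ [f a] := by
  induction l with
  | nil => simp [List.modify]
  | cons x xs ih => simpa [List.modify] using ih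

-- glue t S prepends t onto the first element of S
def brkGlue (t : List Char) : List (List Char) → List (List Char)
  | [] => [t]
  | u :: us => (t ++ u) :: us

theorem brk_inner (cs : List Char) : ∀ (pre : List (List Char)) (t : List Char),
    (cs.foldl brkStep (pre ++ [t], pre.length)).1 = pre ++ brkGlue t (brkSplit cs) := by
  induction cs with
  | nil => intro pre t; simp [brkSplit, brkGlue]
  | cons c rest ih =>
    intro pre t
    simp only [List.foldl_cons, brkStep, brkSplit]
    by_cases hc : c ∈ brkSeps
    · simp only [hc, if_pos]
      have : pre ++ [t] ++ [[c], []] = (pre ++ [t, [c]]) ++ [[]] := by simp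
      rw [this]
      have hlen : pre.length + 2 = (pre ++ [t, [c]]).length := by simp
      rw [hlen, ih (pre ++ [t, [c]]) []]
      cases h : brkSplit rest with
      | nil => exact absurd h (brkSplit_ne_nil rest)
      | cons u us => simp [brkGlue]
    · simp only [hc, if_neg, not_false_iff]
      rw [modify_append_last, ih pre (t ++ [c])]
      cases h : brkSplit rest with
      | nil => exact absurd h (brkSplit_ne_nil rest)
      | cons u us => simp [brkGlue]

theorem brk_line (cs : List Char) :
    (cs.foldl brkStep ([[]], 0)).1 = brkSplit cs := by
  have := brk_inner cs [] []
  simp only [List.nil_append, List.length_nil] at this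
  rw [this]
  cases h : brkSplit cs with
  | nil => exact absurd h (brkSplit_ne_nil cs)
  | cons u us => simp [brkGlue]

theorem brk_foldl_map {α β : Type} (f : α → β) (l : List α) (acc : List β) :
    l.foldl (fun acc x => acc ++ [f x]) acc = acc ++ l.map f := by
  induction l generalizing acc with
  | nil => simp
  | cons x xs ih => simp [ih]

-- ===== VERDICT (by name: the statement is the Claim_ definition above) =====
theorem brk_spec : Claim_equal_brk := by
  intro listed _
  unfold Spec_brk brk brk_alt
  rw [brk_foldl_map]
  simp [brk_line]
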